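-- pv_equiv track=rewrite | github.com/minhdenthedev/oriented-task-chatbot-multiwoz | final_evaluate.py | parse_slot_value_pair
-- ===== SOURCE A (Python) =====
-- def parse_slot_value_pair(tokens, tags):
--     slot_value_pairs = []
--     current_slot = None
--     current_value = []
--
--     for token, tag in zip(tokens, tags):
--         if tag.startswith('B-'):
--             if current_slot:
--                 slot_value_pairs.append({"slot": current_slot, "value": " ".join(current_value)})
--             current_slot = tag[2:]
--             current_value = [token]
--         elif tag.startswith('I-') and current_slot == tag[2:]:
--             current_value.append(token)
--         else:
--             if current_slot:
--                 slot_value_pairs.append({"slot": current_slot, "value": " ".join(current_value)})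
--                 current_slot = None
--                 current_value = []
--
--     # Handle the last slot-value pair
--     if current_slot:
--         slot_value_pairs.append({"slot": current_slot, "value": " ".join(current_value)})
--
--     results = [f"{pair['slot']}={pair['value']}" for pair in slot_value_pairs]
--
--     return results
-- ===== SOURCE B (Python) =====
-- def parse_slot_value_pair(tokens, tags):
--     pairs = list(zip(tokens, tags))
--     results = []
--     i = 0
--     n = len(pairs)
--     while i < n:
--         token, tag = pairs[i]
--         i += 1
--         if tag.startswith('B-'):
--             slot = tag[2:]
--             value = [token]
--             while i < n and pairs[i][1].startswith('I-') and pairs[i][1][2:] == slot: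
--                 value.append(pairs[i][0])
--                 i += 1
--             if slot:
--                 results.append(f"{slot}=" + " ".join(value))
--     return results
-- ===== Notes on version B (the rewrite author's own statement) =====
-- stated objective: simpler
-- what changed: Replaces A's carried current_slot/current_value state machine with boundary flushing (and the intermediate list of dicts) by a greedy span scan over the zipped pairs: on each 'B-' tag an inner loop consumes the matching 'I-' continuation and emits the slot=value string immediately.
import Mathlib
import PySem

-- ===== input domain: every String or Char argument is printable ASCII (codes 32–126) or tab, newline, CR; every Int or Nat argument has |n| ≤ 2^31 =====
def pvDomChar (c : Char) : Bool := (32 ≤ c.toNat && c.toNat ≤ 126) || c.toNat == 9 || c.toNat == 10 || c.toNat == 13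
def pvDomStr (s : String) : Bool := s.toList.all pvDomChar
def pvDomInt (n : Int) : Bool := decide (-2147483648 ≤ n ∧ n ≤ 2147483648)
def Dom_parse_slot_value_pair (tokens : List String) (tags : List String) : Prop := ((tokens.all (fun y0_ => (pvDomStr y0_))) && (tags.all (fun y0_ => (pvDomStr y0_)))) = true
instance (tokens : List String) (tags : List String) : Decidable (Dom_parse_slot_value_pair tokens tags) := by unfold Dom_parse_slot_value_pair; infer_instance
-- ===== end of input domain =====

-- B replaces A's carried current_slot/current_value state machine (with its intermediate dict list)
-- by a greedy span scan that emits each named slot=value string as soon as its B-span is consumed; same cost, simpler.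

-- ===== PORT A =====
-- Python truthiness of current_slot (None or a str): true iff it is a nonempty string.
def pvTruthy (o : Option String) : Bool :=
  match o with
  | none => false
  | some s => !(s == "")

-- the dict {"slot": s, "value": v} carries exactly two fixed fields; it is ported as the pair (s, v)
def pvEmit (p : String × String) : String := p.1 ++ "=" ++ p.2   -- f"{pair['slot']}={pair['value']}"

-- the for-loop of A over zip(tokens, tags), state (slot_value_pairs, current_slot, current_value)
def parseA_loop : List (String × String) → List (String × String) → Option String → List String → List (String × String)
  | [], acc, cslot, cval =>
      -- "Handle the last slot-value pair"
      if pvTruthy cslot then acc ++ [(cslot.getD "", PySem.Str.join " " cval)] else acc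
  | (token, tag) :: rest, acc, cslot, cval =>
      if PySem.Str.startswith tag "B-" then
        let acc' := if pvTruthy cslot then acc ++ [(cslot.getD "", PySem.Str.join " " cval)] else acc
        parseA_loop rest acc' (some (PySem.Str.slice tag (some 2) none)) [token]
      else if PySem.Str.startswith tag "I-" && (cslot == some (PySem.Str.slice tag (some 2) none)) then
        parseA_loop rest acc cslot (cval ++ [token])
      else
        if pvTruthy cslot then
          parseA_loop rest (acc ++ [(cslot.getD "", PySem.Str.join " " cval)]) none []
        else
          parseA_loop rest acc cslot cval

def parse_slot_value_pair (tokens : List String) (tags : List String) : List String :=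
  (parseA_loop (tokens.zip tags) [] none []).map pvEmit

-- ===== PORT B =====
-- inner while loop of Source B: consume the 'I-'-continuation of slot, returning (collected tokens, remaining pairs)
def spanB (slot : String) : List (String × String) → List String × List (String × String)
  | [] => ([], [])
  | (tok, tag) :: rest =>
      if PySem.Str.startswith tag "I-" && (PySem.Str.slice tag (some 2) none == slot) then
        (tok :: (spanB slot rest).1, (spanB slot rest).2)
      else ([], (tok, tag) :: rest)

-- outer while loop of Source B over the zipped pairs; the fuel argument (the number of pairs left,
-- which bounds the iteration count) only makes the recursion structural, it never cuts it short
def parseB_go : Nat → List (String × String) → List String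
  | 0, _ => []
  | _ + 1, [] => []
  | fuel + 1, (token, tag) :: rest =>
      if PySem.Str.startswith tag "B-" then
        let slot := PySem.Str.slice tag (some 2) none
        -- Source B: "if slot:" — only a named slot is emitted
        if slot == "" then parseB_go fuel (spanB slot rest).2
        else (slot ++ "=" ++ PySem.Str.join " " (token :: (spanB slot rest).1))
              :: parseB_go fuel (spanB slot rest).2
      else parseB_go fuel rest

def parse_slot_value_pair_alt (tokens : List String) (tags : List String) : List String :=
  parseB_go (tokens.zip tags).length (tokens.zip tags)

-- ===== PRECONDITION & SPEC =====
def Spec_parse_slot_value_pair (tokens : List String) (tags : List String) (out : List String) : Prop :=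
  out = parse_slot_value_pair_alt tokens tags
instance (tokens : List String) (tags : List String) (out : List String) : Decidable (Spec_parse_slot_value_pair tokens tags out) := by
  unfold Spec_parse_slot_value_pair; infer_instance

-- ===== CLAIM =====
def Claim_equal_parse_slot_value_pair : Prop := ∀ (tokens : List String) (tags : List String), Dom_parse_slot_value_pair tokens tags → Spec_parse_slot_value_pair tokens tags (parse_slot_value_pair tokens tags)

-- ===== LEMMAS AND PROOFS =====

theorem spanB_rest_le (slot : String) (ps : List (String × String)) :
    (spanB slot ps).2.length ≤ ps.length := by
  induction ps with
  | nil => simp [spanB]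
  | cons p rest ih =>
      obtain ⟨tok, tag⟩ := p
      simp only [spanB]
      split
      · exact Nat.le_succ_of_le ih
      · simp

theorem parseB_go_fuel (f g : Nat) (ps : List (String × String))
    (hf : ps.length ≤ f) (hg : ps.length ≤ g) : parseB_go f ps = parseB_go g ps := by
  induction f generalizing g ps with
  | zero =>
      have : ps = [] := List.length_eq_zero_iff.mp (Nat.le_zero.mp hf)
      subst this
      cases g <;> simp [parseB_go]
  | succ f ih =>
      cases ps with
      | nil => cases g <;> simp [parseB_go]
      | cons p rest =>
          obtain ⟨tok, tag⟩ := p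
          cases g with
          | zero => simp at hg
          | succ g =>
              simp only [parseB_go]
              have hr : rest.length ≤ f := by simpa using hf
              have hr' : rest.length ≤ g := by simpa using hg
              have hs := spanB_rest_le (PySem.Str.slice tag (some 2) none) rest
              split
              · split
                · rw [ih _ _ (le_trans hs hr) (le_trans hs hr')]
                · rw [ih _ _ (le_trans hs hr) (le_trans hs hr')]
              · exact ih _ _ hr hr'

-- B's loop run with exactly enough fuel, and its one-step unfolding
def parseBrun (ps : List (String × String)) : List String := parseB_go ps.length ps

theorem parseBrun_cons (tok tag : String) (rest : List (String × String)) :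
    parseBrun ((tok, tag) :: rest)
      = if PySem.Str.startswith tag "B-" then
          if (PySem.Str.slice tag (some 2) none == "") then
            parseBrun (spanB (PySem.Str.slice tag (some 2) none) rest).2
          else
            (PySem.Str.slice tag (some 2) none ++ "=" ++
              PySem.Str.join " " (tok :: (spanB (PySem.Str.slice tag (some 2) none) rest).1))
              :: parseBrun (spanB (PySem.Str.slice tag (some 2) none) rest).2
        else parseBrun rest := by
  show parseB_go (rest.length + 1) _ = _
  simp only [parseB_go, parseBrun]
  have hs := spanB_rest_le (PySem.Str.slice tag (some 2) none) rest
  split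
  · split
    · rw [parseB_go_fuel rest.length _ _ hs (le_refl _)]
    · rw [parseB_go_fuel rest.length _ _ hs (le_refl _)]
  · rfl

theorem alt_eq_parseBrun (tokens tags : List String) :
    parse_slot_value_pair_alt tokens tags = parseBrun (tokens.zip tags) := rfl

theorem not_B_of_I {tag : String} (h : PySem.Str.startswith tag "I-" = true) :
    PySem.Str.startswith tag "B-" = false := by
  rw [PySem.Str.startswith_eq, PySem.Chars.startswith_iff] at h
  obtain ⟨l, hl⟩ := h
  rw [PySem.Str.startswith_eq]
  rw [Bool.eq_false_iff]
  intro hc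
  rw [PySem.Chars.startswith_iff, ← hl] at hc
  rcases hc with ⟨t, ht⟩
  simp at ht

theorem beq_some_comm (s x : String) : ((some s == some x) : Bool) = (x == s) := by
  by_cases h : s = x
  · simp [h]
  · simp [h, Ne.symm h]

-- pairs consumed by B's inner while loop carry 'I-' tags, which B's outer loop skips anyway
theorem parseBrun_spanB (s : String) (ps : List (String × String)) :
    parseBrun (spanB s ps).2 = parseBrun ps := by
  induction ps with
  | nil => rfl
  | cons p rest ih =>
      obtain ⟨tok, tag⟩ := p
      by_cases hc : (PySem.Str.startswith tag "I-" && (PySem.Str.slice tag (some 2) none == s)) = true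
      · obtain ⟨hI, _⟩ := Bool.and_eq_true_iff.mp hc
        have hBf := not_B_of_I hI
        simp only [spanB, hc, if_true]
        rw [ih, parseBrun_cons, hBf]
        simp
      · have hcf := Bool.eq_false_iff.mpr hc
        simp only [spanB, hcf, Bool.false_eq_true, if_false]

-- main invariant: A's loop with a dead current slot (None or "") produces exactly B's scan of the
-- remaining pairs, and with a live slot s ≠ "" it produces s's span entry followed by B's scan.
theorem AB_main (ps : List (String × String)) :
    (∀ acc cval cslot, pvTruthy cslot = false →
        (parseA_loop ps acc cslot cval).map pvEmit = acc.map pvEmit ++ parseBrun ps)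
    ∧ (∀ acc cval s, s ≠ "" →
        (parseA_loop ps acc (some s) cval).map pvEmit
          = acc.map pvEmit
              ++ (s ++ "=" ++ PySem.Str.join " " (cval ++ (spanB s ps).1)) :: parseBrun (spanB s ps).2) := by
  induction ps with
  | nil =>
      refine ⟨fun acc cval cslot hdead => by simp [parseA_loop, hdead, parseBrun, parseB_go], ?_⟩
      intro acc cval s hs
      have hst : (s == "") = false := by simp [hs]
      simp [parseA_loop, pvTruthy, hst, spanB, parseBrun, parseB_go, pvEmit]
  | cons p rest ih =>
      obtain ⟨tok, tag⟩ := p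
      obtain ⟨ih1, ih2⟩ := ih
      by_cases hB : PySem.Str.startswith tag "B-" = true
      · -- a 'B-' tag: A opens a new span; B consumes it (emitting it iff the slot name is nonempty)
        by_cases hsl : (PySem.Str.slice tag (some 2) none == "") = true
        · -- nameless slot: both sides drop it
          have hdead' : pvTruthy (some (PySem.Str.slice tag (some 2) none)) = false := by
            simp [pvTruthy, hsl]
          constructor
          · intro acc cval cslot hdead
            rw [parseBrun_cons, if_pos hB, if_pos hsl, parseBrun_spanB]
            simp only [parseA_loop, hB, if_true, hdead, Bool.false_eq_true, if_false]
            exact ih1 acc [tok] _ hdead'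
          · intro acc cval s hs
            have hst : (s == "") = false := by simp [hs]
            have hItagf : PySem.Str.startswith tag "I-" = false := by
              rw [Bool.eq_false_iff]; intro hI
              exact absurd hB (by rw [not_B_of_I hI]; simp)
            have hspan : spanB s ((tok, tag) :: rest) = ([], (tok, tag) :: rest) := by
              simp only [spanB, hItagf]
              simp
            rw [hspan, parseBrun_cons, if_pos hB, if_pos hsl, parseBrun_spanB]
            simp only [parseA_loop, hB, if_true, pvTruthy, hst, Bool.not_false, Option.getD_some]
            rw [ih1 (acc ++ [(s, PySem.Str.join " " cval)]) [tok] _ hdead']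
            simp [pvEmit]
        · -- named slot: A opens a live span, B emits it after consuming its continuation
          have hslne : PySem.Str.slice tag (some 2) none ≠ "" := by simpa using hsl
          constructor
          · intro acc cval cslot hdead
            rw [parseBrun_cons, if_pos hB, if_neg (by simpa using hsl)]
            simp only [parseA_loop, hB, if_true, hdead, Bool.false_eq_true, if_false]
            rw [ih2 acc [tok] _ hslne]
            simp
          · intro acc cval s hs
            have hst : (s == "") = false := by simp [hs]
            have hItagf : PySem.Str.startswith tag "I-" = false := by
              rw [Bool.eq_false_iff]; intro hI
              exact absurd hB (by rw [not_B_of_I hI]; simp)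
            have hspan : spanB s ((tok, tag) :: rest) = ([], (tok, tag) :: rest) := by
              simp only [spanB, hItagf]
              simp
            rw [hspan, parseBrun_cons, if_pos hB, if_neg (by simpa using hsl)]
            simp only [parseA_loop, hB, if_true, pvTruthy, hst, Bool.not_false, Option.getD_some]
            rw [ih2 (acc ++ [(s, PySem.Str.join " " cval)]) [tok] _ hslne]
            simp [pvEmit]
      · -- not a 'B-' tag
        have hBf : PySem.Str.startswith tag "B-" = false := Bool.eq_false_iff.mpr hB
        constructor
        · intro acc cval cslot hdead
          rw [parseBrun_cons, if_neg hB]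
          by_cases hc : (PySem.Str.startswith tag "I-" && (cslot == some (PySem.Str.slice tag (some 2) none))) = true
          · -- (only possible with cslot = some "") dead append: no output either way
            simp only [parseA_loop, hBf, Bool.false_eq_true, if_false, hc, if_true]
            exact ih1 acc (cval ++ [tok]) _ hdead
          · have hcf := Bool.eq_false_iff.mpr hc
            simp only [parseA_loop, hBf, Bool.false_eq_true, if_false, hcf, hdead]
            exact ih1 acc cval _ hdead
        · intro acc cval s hs
          have hst : (s == "") = false := by simp [hs]
          by_cases hc : (PySem.Str.startswith tag "I-" && (PySem.Str.slice tag (some 2) none == s)) = true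
          · -- matching 'I-' continuation: both sides extend the current span
            obtain ⟨hItag, hEq⟩ := Bool.and_eq_true_iff.mp hc
            have hA : ((some s == some (PySem.Str.slice tag (some 2) none)) : Bool) = true := by
              rw [beq_some_comm]; exact hEq
            have hspan : spanB s ((tok, tag) :: rest)
                = (tok :: (spanB s rest).1, (spanB s rest).2) := by
              simp only [spanB, hc, if_true]
            rw [hspan]
            simp only [parseA_loop, hBf, Bool.false_eq_true, if_false, hItag, Bool.true_and, hA,
              if_true]
            rw [ih2 acc (cval ++ [tok]) _ hs]
            simp
          · -- mismatching tag: A flushes the open span, B's inner loop stops before it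
            have hcf := Bool.eq_false_iff.mpr hc
            have hcond : (PySem.Str.startswith tag "I-"
                && ((some s : Option String) == some (PySem.Str.slice tag (some 2) none))) = false := by
              rcases Bool.and_eq_false_iff.mp hcf with h | h
              · rw [h]; simp
              · rw [beq_some_comm]; rw [h]; simp
            have hspan : spanB s ((tok, tag) :: rest) = ([], (tok, tag) :: rest) := by
              simp only [spanB, hcf, Bool.false_eq_true, if_false]
            rw [hspan, parseBrun_cons, if_neg hB]
            simp only [parseA_loop, hBf, Bool.false_eq_true, if_false, hcond, pvTruthy, hst,
              Bool.not_false, if_true, Option.getD_some]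
            rw [ih1 (acc ++ [(s, PySem.Str.join " " cval)]) [] none rfl]
            simp [pvEmit]

-- ===== VERDICT =====
theorem parse_slot_value_pair_spec : Claim_equal_parse_slot_value_pair := by
  intro tokens tags _
  have h := (AB_main (tokens.zip tags)).1 [] [] none rfl
  simpa [Spec_parse_slot_value_pair, parse_slot_value_pair, alt_eq_parseBrun] using h
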